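-- pv_equiv track=rewrite | github.com/AP-MI-2021/lab-3-TrifanLetitia | main.py | get_longest_digit_count_desc
-- ===== SOURCE A (Python) =====
-- def get_longest_digit_count_desc(lista):
--     '''
--     Descriere: Determina cea mai luna secventa de numere cu numarul de cifre i ordine descrescatoare.
--     Input: O lista de numere naturale
--     Output: Cea mai luna secventa de numere cu numarul de cifre in ordine descrescatoare.
--     '''
--     numarcif = []
--     seq1 = []
--     for i in range(len(lista)):
--         ncif = 0
--         nr = lista[i]
--         if nr > 0:
--             while nr > 0:
--                 cif = nr % 10
--                 ncif += 1
--                 nr = nr // 10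
--             numarcif.append(ncif)
--         else:
--             numarcif.append(1)
--     ccount = 0
--     count = 0
--     starti = 0
--     cstarti = 0
--     for i in range(len(numarcif) - 1):
--         e1 = numarcif[i]
--         e2 = numarcif[i + 1]
--         if e1 > e2:
--             ccount += 1
--             if ccount == 1:
--                 cstarti = i
--             if ccount > count:
--                 count = ccount
--                 starti = cstarti
--         else:
--             ccount = 0
--     if count == 0:
--         return []
--
--     else:
--         seq1.append(lista[starti:(starti + count + 1)])
--     count1 = 0
--     ccount1 = 0
--     start1 = 0
--     cstart1 = 0
--     a = starti + count + 1
--     for i in range(a, len(numarcif) - 1):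
--         e1 = numarcif[i]
--         e2 = numarcif[i + 1]
--         if e1 > e2:
--             ccount1 += 1
--             if ccount1 == 1:
--                 cstart1 = i
--             if ccount1 > count1:
--                 count1 = ccount1
--                 start1 = cstart1
--         else:
--             count1 = 0
--             ccount1 = 0
--             start1 = 0
--             cstart1 = 0
--         if count == 0:
--             return []
--         else:
--             if count1 == count:
--                 seq1.append(lista[start1:(start1 + count + 1)])
--     return seq1
-- ===== SOURCE B (Python) =====
-- def get_longest_digit_count_desc(lista):
--     '''Same result as A via a single run-collection pass plus a max/filter (simpler decomposition).'''
--     def _ndigits(nr):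
--         if nr <= 0:
--             return 1
--         d = 0
--         while nr > 0:
--             d += 1
--             nr //= 10
--         return d
--
--     cs = [_ndigits(nr) for nr in lista]
--     runs = []          # (start index, number of consecutive descents) of each maximal descending run
--     cur = 0
--     for i in range(1, len(cs)):
--         if cs[i - 1] > cs[i]:
--             cur += 1
--         else:
--             if cur > 0:
--                 runs.append((i - 1 - cur, cur))
--             cur = 0
--     if cur > 0:
--         runs.append((len(cs) - 1 - cur, cur))
--     m = 0
--     for _, r in runs:
--         if r > m:
--             m = r
--     if m == 0:
--         return []
--     return [lista[s:s + m + 1] for s, r in runs if r == m]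
-- ===== Notes on version B (the rewrite author's own statement) =====
-- stated objective: simpler
-- what changed: A finds the best run with one state-machine scan and then re-runs a second copy of the same state machine from an offset to find equal runs; B makes a single pass that collects every maximal descending run as a (start, length) pair and then just takes the max length and one filter/map over the collected runs.
import Mathlib
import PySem

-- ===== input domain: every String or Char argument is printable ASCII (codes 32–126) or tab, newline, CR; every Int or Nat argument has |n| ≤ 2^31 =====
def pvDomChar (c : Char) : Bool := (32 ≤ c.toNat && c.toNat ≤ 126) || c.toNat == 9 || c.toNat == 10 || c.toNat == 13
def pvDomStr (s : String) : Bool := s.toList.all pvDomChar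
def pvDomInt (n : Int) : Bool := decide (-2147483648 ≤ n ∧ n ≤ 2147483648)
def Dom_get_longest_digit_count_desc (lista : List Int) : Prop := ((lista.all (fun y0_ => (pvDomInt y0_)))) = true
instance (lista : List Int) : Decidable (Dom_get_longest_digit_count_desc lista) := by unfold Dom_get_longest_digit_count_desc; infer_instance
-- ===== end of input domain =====

-- B replaces A's scan-then-rescan-from-offset structure by one run-collecting pass plus a max/filter (simpler decomposition; same cost).

-- ===== PORT A =====
-- 'while nr > 0: cif = nr % 10; ncif += 1; nr = nr // 10'  (cif is computed and discarded in the Python; ncif is returned)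
def pvAWhile (ncif : Int) (nr : Int) : Int :=
  if 0 < nr then pvAWhile (ncif + 1) (PySem.Int.floordiv nr 10) else ncif
termination_by nr.toNat
decreasing_by
  simp only [PySem.Int.floordiv_eq_ediv_of_pos (by norm_num : (0:Int) < 10)]
  omega

-- body of A's first counting scan ('for i in range(len(lista)): …')
def pvABody0 (lista : List Int) (acc : List Int) (i : Int) : List Int :=
  let nr := PySem.List.pyGetD lista i 0
  if 0 < nr then acc ++ [pvAWhile 0 nr] else acc ++ [1]

-- body of A's first run scan; state = (ccount, count, starti, cstarti)
def pvABody1 (numarcif : List Int) (st : Int × Int × Int × Int) (i : Int) : Int × Int × Int × Int :=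
  let e1 := PySem.List.pyGetD numarcif i 0
  let e2 := PySem.List.pyGetD numarcif (i + 1) 0
  if e1 > e2 then
    let cc := st.1 + 1
    let cs := if cc = 1 then i else st.2.2.2
    if cc > st.2.1 then (cc, cc, cs, cs) else (cc, st.2.1, st.2.2.1, cs)
  else (0, st.2.1, st.2.2.1, st.2.2.2)

-- body of A's second run scan; state = (count1, ccount1, start1, cstart1, seq1);
-- the in-loop 'if count == 0: return []' is unreachable on this path (count ≠ 0 there and count is
-- never reassigned inside the loop), so it is ported as its else-branch.
def pvABody2 (lista numarcif : List Int) (count : Int)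
    (st : Int × Int × Int × Int × List (List Int)) (i : Int) : Int × Int × Int × Int × List (List Int) :=
  let e1 := PySem.List.pyGetD numarcif i 0
  let e2 := PySem.List.pyGetD numarcif (i + 1) 0
  let q :=
    if e1 > e2 then
      let cc := st.2.1 + 1
      let cs := if cc = 1 then i else st.2.2.2.1
      if cc > st.1 then (cc, cc, cs, cs) else (st.1, cc, st.2.2.1, cs)
    else (0, 0, 0, 0)
  if q.1 = count then
    (q.1, q.2.1, q.2.2.1, q.2.2.2,
      st.2.2.2.2 ++ [PySem.List.slice lista (some q.2.2.1) (some (q.2.2.1 + count + 1))])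
  else (q.1, q.2.1, q.2.2.1, q.2.2.2, st.2.2.2.2)

def get_longest_digit_count_desc (lista : List Int) : List (List Int) :=
  let numarcif := (PySem.List.pyRange 0 (lista.length : Int) 1).foldl (pvABody0 lista) []
  let s2 := (PySem.List.pyRange 0 ((numarcif.length : Int) - 1) 1).foldl (pvABody1 numarcif) (0, 0, 0, 0)
  let count := s2.2.1
  let starti := s2.2.2.1
  if count = 0 then []
  else
    let seq1 := [PySem.List.slice lista (some starti) (some (starti + count + 1))]
    let a := starti + count + 1
    let s3 := (PySem.List.pyRange a ((numarcif.length : Int) - 1) 1).foldl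
      (pvABody2 lista numarcif count) (0, 0, 0, 0, seq1)
    s3.2.2.2.2

-- ===== PORT B =====
def pvBWhile (d : Int) (nr : Int) : Int :=
  if 0 < nr then pvBWhile (d + 1) (PySem.Int.floordiv nr 10) else d
termination_by nr.toNat
decreasing_by
  simp only [PySem.Int.floordiv_eq_ediv_of_pos (by norm_num : (0:Int) < 10)]
  omega

def pvBNdigits (nr : Int) : Int := if nr ≤ 0 then 1 else pvBWhile 0 nr

-- body of B's single run-collecting pass; state = (runs, cur)
def pvBBody (cs : List Int) (st : List (Int × Int) × Int) (i : Int) : List (Int × Int) × Int :=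
  if PySem.List.pyGetD cs (i - 1) 0 > PySem.List.pyGetD cs i 0 then (st.1, st.2 + 1)
  else ((if 0 < st.2 then st.1 ++ [(i - 1 - st.2, st.2)] else st.1), 0)

def get_longest_digit_count_desc_alt (lista : List Int) : List (List Int) :=
  let cs := lista.map pvBNdigits
  let rc := (PySem.List.pyRange 1 (cs.length : Int) 1).foldl (pvBBody cs) ([], 0)
  let runs := if 0 < rc.2 then rc.1 ++ [((cs.length : Int) - 1 - rc.2, rc.2)] else rc.1
  let m := runs.foldl (fun m r => if r.2 > m then r.2 else m) 0
  if m = 0 then []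
  else (runs.filter (fun r => decide (r.2 = m))).map
    (fun r => PySem.List.slice lista (some r.1) (some (r.1 + m + 1)))

-- ===== PRECONDITION & SPEC =====
def Spec_get_longest_digit_count_desc (lista : List Int) (out : List (List Int)) : Prop := out = get_longest_digit_count_desc_alt lista
instance (lista : List Int) (out : List (List Int)) : Decidable (Spec_get_longest_digit_count_desc lista out) := by unfold Spec_get_longest_digit_count_desc; infer_instance

-- ===== CLAIM (what is proved, stated in full; the proofs are below) =====
def Claim_equal_get_longest_digit_count_desc : Prop := ∀ (lista : List Int), Dom_get_longest_digit_count_desc lista → Spec_get_longest_digit_count_desc lista (get_longest_digit_count_desc lista)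

-- ===== LEMMAS AND PROOFS =====

-- descent list of a digit-count list: entry k is cs[k] > cs[k+1]
def descList : List Int → List Bool
  | x :: y :: t => decide (x > y) :: descList (y :: t)
  | _ => []

-- generic indexed fold over a Bool list, position threaded as an Int
def foldIdx {σ : Type} (f : σ → Bool → Int → σ) : σ → Int → List Bool → σ
  | st, _, [] => st
  | st, j, b :: t => foldIdx f (f st b j) (j + 1) t

-- all maximal descending runs of a descent list, as (start, number of descents)
def collectRuns (j cur : Int) : List Bool → List (Int × Int)
  | [] => if 0 < cur then [(j - cur, cur)] else []
  | b :: t =>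
    if b then collectRuns (j + 1) (cur + 1) t
    else (if 0 < cur then [(j - cur, cur)] else []) ++ collectRuns (j + 1) 0 t

-- first-maximum fold: (count, starti) after scanning a run list
def stepFold (p : Int × Int) (rs : List (Int × Int)) : Int × Int :=
  rs.foldl (fun p r => if r.2 > p.1 then (r.2, r.1) else p) p

def gSlices (lista : List Int) (M : Int) (rs : List (Int × Int)) : List (List Int) :=
  (rs.filter (fun r => decide (M ≤ r.2))).map
    (fun r => PySem.List.slice lista (some r.1) (some (r.1 + M + 1)))

-- Bool-level bodies of A's two run scans
def pvF1 (st : Int × Int × Int × Int) (b : Bool) (i : Int) : Int × Int × Int × Int :=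
  if b then
    let cc := st.1 + 1
    let cs := if cc = 1 then i else st.2.2.2
    if cc > st.2.1 then (cc, cc, cs, cs) else (cc, st.2.1, st.2.2.1, cs)
  else (0, st.2.1, st.2.2.1, st.2.2.2)

def pvF3 (lista : List Int) (count : Int)
    (st : Int × Int × Int × Int × List (List Int)) (b : Bool) (i : Int) : Int × Int × Int × Int × List (List Int) :=
  let q :=
    if b then
      let cc := st.2.1 + 1
      let cs := if cc = 1 then i else st.2.2.2.1
      if cc > st.1 then (cc, cc, cs, cs) else (st.1, cc, st.2.2.1, cs)
    else (0, 0, 0, 0)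
  if q.1 = count then
    (q.1, q.2.1, q.2.2.1, q.2.2.2,
      st.2.2.2.2 ++ [PySem.List.slice lista (some q.2.2.1) (some (q.2.2.1 + count + 1))])
  else (q.1, q.2.1, q.2.2.1, q.2.2.2, st.2.2.2.2)

def pvFB (st : List (Int × Int) × Int) (b : Bool) (j : Int) : List (Int × Int) × Int :=
  if b then (st.1, st.2 + 1)
  else ((if 0 < st.2 then st.1 ++ [(j - st.2, st.2)] else st.1), 0)

theorem pvWhile_eq (nr d : Int) : pvAWhile d nr = pvBWhile d nr := by
  fun_induction pvAWhile d nr with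
  | case1 d nr h ih => rw [pvBWhile]; rw [if_pos h]; exact ih
  | case2 d nr h => rw [pvBWhile]; rw [if_neg h]


theorem descList_length (c : List Int) : (descList c).length = c.length - 1 := by
  fun_induction descList c with
  | case1 x y t ih => simp [ih]
  | case2 c h1 =>
    match c with
    | [] => simp
    | [x] => simp
    | x :: y :: t => exact absurd rfl (h1 x y t)


theorem descList_getElem (c : List Int) (k : Nat) (h : k < (descList c).length) :
    (descList c)[k] = decide (c.getD k 0 > c.getD (k + 1) 0) := by
  induction c generalizing k with
  | nil => simp [descList] at h
  | cons x xs ih =>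
    match xs with
    | [] => simp [descList] at h
    | y :: t =>
      match k with
      | 0 => simp [descList]
      | Nat.succ k =>
        simp only [descList, List.getElem_cons_succ, List.getD_cons_succ]
        exact ih k (by simpa [descList] using h)


-- bridge: a pair loop 'for i in range(k, len(c)-1)' over c equals foldIdx over the descent list
theorem bridgeA {σ : Type} (c : List Int) (f : σ → Bool → Int → σ) (k : Nat) (st : σ) :
    (PySem.List.pyRange (k : Int) ((c.length : Int) - 1) 1).foldl
      (fun st i => f st (decide (PySem.List.pyGetD c i 0 > PySem.List.pyGetD c (i + 1) 0)) i) st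
    = foldIdx f st (k : Int) ((descList c).drop k) := by
  induction hn : (descList c).length - k generalizing k st with
  | zero =>
    have hL : (descList c).length ≤ k := by omega
    have hLc := descList_length c
    have h1 : ((c.length : Int) - 1) ≤ (k : Int) := by omega
    rw [PySem.List.pyRange_one_eq_nil h1, List.drop_eq_nil_iff.mpr (by omega)]
    rfl
  | succ n ih =>
    have hk : k < (descList c).length := by omega
    have hLc := descList_length c
    have hkc : (k : Int) < (c.length : Int) - 1 := by omega
    rw [PySem.List.pyRange_one_cons hkc, List.foldl_cons,
        List.drop_eq_getElem_cons hk, descList_getElem c k hk]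
    have e1 : PySem.List.pyGetD c (k : Int) 0 = c.getD k 0 := PySem.List.pyGetD_natCast c k 0
    have e2 : PySem.List.pyGetD c ((k : Int) + 1) 0 = c.getD (k + 1) 0 := by
      rw [show ((k : Int) + 1) = ((k + 1 : Nat) : Int) by push_cast; ring]
      exact PySem.List.pyGetD_natCast c (k + 1) 0
    rw [foldIdx, e1, e2]
    rw [show ((k : Int) + 1) = ((k + 1 : Nat) : Int) by push_cast; ring]
    exact ih (k + 1) _ (by omega)


-- bridge for B's loop 'for i in range(1, len(c))' comparing c[i-1], c[i]
theorem bridgeB {σ : Type} (c : List Int) (f : σ → Bool → Int → σ) (k : Nat) (hk : 1 ≤ k) (st : σ) :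
    (PySem.List.pyRange (k : Int) (c.length : Int) 1).foldl
      (fun st i => f st (decide (PySem.List.pyGetD c (i - 1) 0 > PySem.List.pyGetD c i 0)) (i - 1)) st
    = foldIdx f st ((k : Int) - 1) ((descList c).drop (k - 1)) := by
  induction hn : (descList c).length - (k - 1) generalizing k st with
  | zero =>
    have hLc := descList_length c
    have h1 : ((c.length : Int)) ≤ (k : Int) := by omega
    rw [PySem.List.pyRange_one_eq_nil h1, List.drop_eq_nil_iff.mpr (by omega)]
    rfl
  | succ n ih =>
    have hLc := descList_length c
    have hk1 : k - 1 < (descList c).length := by omega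
    have hkc : (k : Int) < (c.length : Int) := by omega
    rw [PySem.List.pyRange_one_cons hkc, List.foldl_cons,
        List.drop_eq_getElem_cons hk1, descList_getElem c (k - 1) hk1]
    have e1 : PySem.List.pyGetD c ((k : Int) - 1) 0 = c.getD (k - 1) 0 := by
      rw [show ((k : Int) - 1) = ((k - 1 : Nat) : Int) by omega]
      exact PySem.List.pyGetD_natCast c (k - 1) 0
    have e2 : PySem.List.pyGetD c (k : Int) 0 = c.getD (k - 1 + 1) 0 := by
      rw [show (k - 1 + 1) = k by omega]
      exact PySem.List.pyGetD_natCast c k 0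
    rw [foldIdx, e1, e2]
    rw [show ((k : Int) - 1 + 1) = ((k + 1 : Nat) : Int) - 1 by push_cast; omega,
        show ((k : Int) - 1) = ((k : Nat) : Int) - 1 from rfl,
        show (k - 1 + 1) = (k + 1) - 1 by omega]
    exact ih (k + 1) (by omega) _ (by omega)


theorem collect_pos (t : List Bool) : ∀ (j cur : Int), 0 < cur →
    ∃ ℓ rest, collectRuns j cur t = (j - cur, ℓ) :: rest ∧ cur ≤ ℓ := by
  induction t with
  | nil =>
    intro j cur h
    exact ⟨cur, [], by simp [collectRuns, h], le_refl cur⟩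
  | cons b t ih =>
    intro j cur h
    cases b with
    | true =>
      obtain ⟨ℓ, rest, heq, hle⟩ := ih (j + 1) (cur + 1) (by omega)
      refine ⟨ℓ, rest, ?_, by omega⟩
      rw [show j - cur = j + 1 - (cur + 1) by ring]
      simpa [collectRuns] using heq
    | false =>
      exact ⟨cur, collectRuns (j + 1) 0 t, by simp [collectRuns, h], le_refl cur⟩


theorem collect_len_pos (t : List Bool) : ∀ (j cur : Int), 0 ≤ cur →
    ∀ r ∈ collectRuns j cur t, 0 < r.2 := by
  induction t with
  | nil =>
    intro j cur h r hr
    simp only [collectRuns] at hr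
    split at hr
    · rename_i hcur; simp at hr; subst hr; simpa using hcur
    · simp at hr
  | cons b t ih =>
    intro j cur h r hr
    cases b with
    | true => exact ih (j + 1) (cur + 1) (by omega) r (by simpa [collectRuns] using hr)
    | false =>
      simp only [collectRuns, if_neg (by simp : ¬ (false = true))] at hr
      rcases List.mem_append.1 hr with h1 | h2
      · split at h1
        · rename_i hcur; simp at h1; subst h1; simpa using hcur
        · simp at h1
      · exact ih (j + 1) 0 (le_refl 0) r h2


theorem collect_start_ge (t : List Bool) : ∀ (j cur : Int), 0 ≤ cur →
    ∀ r ∈ collectRuns j cur t, j - cur ≤ r.1 := by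
  induction t with
  | nil =>
    intro j cur h r hr
    simp only [collectRuns] at hr
    split at hr
    · simp at hr; subst hr; simp
    · simp at hr
  | cons b t ih =>
    intro j cur h r hr
    cases b with
    | true =>
      have := ih (j + 1) (cur + 1) (by omega) r (by simpa [collectRuns] using hr)
      omega
    | false =>
      simp only [collectRuns, if_neg (by simp : ¬ (false = true))] at hr
      rcases List.mem_append.1 hr with h1 | h2
      · split at h1
        · simp at h1; subst h1; simp
        · simp at h1
      · have := ih (j + 1) 0 (le_refl 0) r h2
        omega


theorem collect_suffix (t : List Bool) : ∀ (j cur s ℓ : Int) rest, 0 ≤ cur →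
    collectRuns j cur t = (s, ℓ) :: rest →
    j ≤ s + ℓ ∧ rest = collectRuns (s + ℓ + 1) 0 (t.drop (s + ℓ + 1 - j).toNat) := by
  induction t with
  | nil =>
    intro j cur s ℓ rest h heq
    simp only [collectRuns] at heq
    split at heq
    · simp at heq
      obtain ⟨⟨hs, hl⟩, hr⟩ := heq
      subst hs; subst hl; subst hr
      constructor
      · omega
      · simp [collectRuns]
    · simp at heq
  | cons b t ih =>
    intro j cur s ℓ rest h heq
    cases b with
    | true =>
      simp only [collectRuns] at heq
      obtain ⟨h1, h2⟩ := ih (j + 1) (cur + 1) s ℓ rest (by omega) heq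
      refine ⟨by omega, ?_⟩
      rw [h2]
      congr 1
      rw [show (s + ℓ + 1 - j).toNat = (s + ℓ + 1 - (j + 1)).toNat + 1 by omega]
      simp
    | false =>
      simp only [collectRuns, if_neg (by simp : ¬ (false = true))] at heq
      by_cases hc : 0 < cur
      · rw [if_pos hc] at heq
        simp only [List.cons_append, List.nil_append, List.cons.injEq] at heq
        obtain ⟨hhd, hrest⟩ := heq
        have hs : s = j - cur := by rw [Prod.ext_iff] at hhd; exact hhd.1.symm
        have hl : ℓ = cur := by rw [Prod.ext_iff] at hhd; exact hhd.2.symm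
        refine ⟨by omega, ?_⟩
        rw [show (s + ℓ + 1 - j).toNat = 1 by omega, show s + ℓ + 1 = j + 1 by omega]
        simpa using hrest.symm
      · rw [if_neg hc] at heq
        simp only [List.nil_append] at heq
        have hge := collect_start_ge t (j + 1) 0 (le_refl 0) (s, ℓ) (by rw [heq]; exact List.mem_cons_self)
        have hlp := collect_len_pos t (j + 1) 0 (le_refl 0) (s, ℓ) (by rw [heq]; exact List.mem_cons_self)
        simp only at hge hlp
        obtain ⟨h1, h2⟩ := ih (j + 1) 0 s ℓ rest (le_refl 0) heq
        refine ⟨by omega, ?_⟩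
        rw [h2]
        congr 1
        rw [show (s + ℓ + 1 - j).toNat = (s + ℓ + 1 - (j + 1)).toNat + 1 by omega]
        simp


theorem collect_decomp_suffix (pre : List (Int × Int)) :
    ∀ (r : Int × Int) post (j cur : Int) (t : List Bool), 0 ≤ cur →
    collectRuns j cur t = pre ++ r :: post →
    post = collectRuns (r.1 + r.2 + 1) 0 (t.drop (r.1 + r.2 + 1 - j).toNat) := by
  induction pre with
  | nil =>
    intro r post j cur t h heq
    exact (collect_suffix t j cur r.1 r.2 post h (by simpa using heq)).2
  | cons p pre ih =>
    intro r post j cur t h heq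
    simp only [List.cons_append] at heq
    obtain ⟨hle, hsuf⟩ := collect_suffix t j cur p.1 p.2 (pre ++ r :: post) h (by simpa using heq)
    have hmem : r ∈ collectRuns (p.1 + p.2 + 1) 0 (t.drop (p.1 + p.2 + 1 - j).toNat) := by
      rw [← hsuf]; simp
    have hge := collect_start_ge _ (p.1 + p.2 + 1) 0 (le_refl 0) r hmem
    have hlp := collect_len_pos _ (p.1 + p.2 + 1) 0 (le_refl 0) r hmem
    have := ih r post (p.1 + p.2 + 1) 0 _ (le_refl 0) hsuf.symm
    rw [this, List.drop_drop,
      show (p.1 + p.2 + 1 - j).toNat + (r.1 + r.2 + 1 - (p.1 + p.2 + 1)).toNat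
        = (r.1 + r.2 + 1 - j).toNat by omega]


theorem stepFold_fst (rs : List (Int × Int)) : ∀ (p : Int × Int),
    (stepFold p rs).1 = rs.foldl (fun acc r => if r.2 > acc then r.2 else acc) p.1 := by
  induction rs with
  | nil => intro p; rfl
  | cons r t ih =>
    intro p
    simp only [stepFold, List.foldl_cons]
    by_cases hc : r.2 > p.1
    · rw [if_pos hc, if_pos hc]
      exact ih (r.2, r.1)
    · rw [if_neg hc, if_neg hc]
      exact ih p


theorem stepFold_decomp (rs : List (Int × Int)) : ∀ (p : Int × Int),
    (stepFold p rs = p ∧ ∀ x ∈ rs, x.2 ≤ p.1) ∨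
    (∃ pre r post, rs = pre ++ r :: post ∧ stepFold p rs = (r.2, r.1) ∧ p.1 < r.2 ∧
      (∀ x ∈ pre, x.2 < r.2) ∧ (∀ x ∈ post, x.2 ≤ r.2)) := by
  induction rs with
  | nil => intro p; exact Or.inl ⟨rfl, by simp⟩
  | cons r0 t ih =>
    intro p
    by_cases hc : r0.2 > p.1
    · have hstep : stepFold p (r0 :: t) = stepFold (r0.2, r0.1) t := by
        simp [stepFold, hc]
      rcases ih (r0.2, r0.1) with ⟨he, hall⟩ | ⟨pre, r, post, heq, hval, hlt, hpre, hpost⟩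
      · refine Or.inr ⟨[], r0, t, by simp, ?_, hc, by simp, ?_⟩
        · rw [hstep, he]
        · intro x hx; exact hall x hx
      · refine Or.inr ⟨r0 :: pre, r, post, by rw [heq]; simp, by rw [hstep, hval], by omega, ?_, hpost⟩
        intro x hx
        rcases List.mem_cons.1 hx with hx0 | hx1
        · subst hx0; omega
        · exact hpre x hx1
    · have hstep : stepFold p (r0 :: t) = stepFold p t := by
        simp [stepFold, hc]
      rcases ih p with ⟨he, hall⟩ | ⟨pre, r, post, heq, hval, hlt, hpre, hpost⟩
      · refine Or.inl ⟨by rw [hstep, he], ?_⟩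
        intro x hx
        rcases List.mem_cons.1 hx with hx0 | hx1
        · subst hx0; omega
        · exact hall x hx1
      · refine Or.inr ⟨r0 :: pre, r, post, by rw [heq]; simp, by rw [hstep, hval], hlt, ?_, hpost⟩
        intro x hx
        rcases List.mem_cons.1 hx with hx0 | hx1
        · subst hx0; omega
        · exact hpre x hx1


theorem stepFold_cons (p r : Int × Int) (rs : List (Int × Int)) :
    stepFold p (r :: rs) = stepFold (if r.2 > p.1 then (r.2, r.1) else p) rs := rfl

theorem stepFold_append (p : Int × Int) (l1 l2 : List (Int × Int)) :
    stepFold p (l1 ++ l2) = stepFold (stepFold p l1) l2 := List.foldl_append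

theorem loop1_char (t : List Bool) : ∀ (j cur count starti cstarti : Int),
    0 ≤ cur → cur ≤ count → (0 < cur → cstarti = j - cur) →
    ((foldIdx pvF1 (cur, count, starti, cstarti) j t).2.1,
     (foldIdx pvF1 (cur, count, starti, cstarti) j t).2.2.1)
      = stepFold (count, starti) (collectRuns j cur t) := by
  induction t with
  | nil =>
    intro j cur count starti cstarti h0 hc hcs
    simp only [foldIdx, collectRuns]
    by_cases hp : 0 < cur
    · rw [if_pos hp, stepFold_cons, if_neg (by simp; omega)]
      rfl
    · rw [if_neg hp]
      rfl
  | cons b t ih =>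
    intro j cur count starti cstarti h0 hc hcs
    cases b with
    | false =>
      simp only [foldIdx]
      have hb : pvF1 (cur, count, starti, cstarti) false j = (0, count, starti, cstarti) := by
        simp [pvF1]
      rw [hb, ih (j + 1) 0 count starti cstarti (le_refl 0) (by omega) (by omega)]
      simp only [collectRuns, if_neg (by simp : ¬ (false = true))]
      rw [stepFold_append]
      by_cases hp : 0 < cur
      · rw [if_pos hp, stepFold_cons, if_neg (by simp; omega)]
        rfl
      · rw [if_neg hp]
        rfl
    | true =>
      simp only [foldIdx]
      have hcs' : (if cur + 1 = 1 then j else cstarti) = j - cur := by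
        by_cases h0' : cur = 0
        · subst h0'; simp
        · rw [if_neg (by omega)]; rw [hcs (by omega)]
      simp only [collectRuns, reduceIte]
      by_cases hgt : cur + 1 > count
      · have hb : pvF1 (cur, count, starti, cstarti) true j = (cur + 1, cur + 1, j - cur, j - cur) := by
          simp only [pvF1, reduceIte]
          simp only [hcs']
          rw [if_pos hgt]
        rw [hb, ih (j + 1) (cur + 1) (cur + 1) (j - cur) (j - cur) (by omega) (le_refl _) (by intro _; omega)]
        obtain ⟨ℓ, rest, heqX, hℓ⟩ := collect_pos t (j + 1) (cur + 1) (by omega)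
        rw [heqX, stepFold_cons, stepFold_cons]
        congr 1
        by_cases hl1 : (ℓ:Int) > cur + 1
        · rw [if_pos (by simpa using hl1), if_pos (by simp; omega)]
        · rw [if_neg (by simpa using hl1), if_pos (by simp; omega)]
          rw [Prod.mk.injEq]
          constructor <;> [omega; omega]
      · have hb : pvF1 (cur, count, starti, cstarti) true j = (cur + 1, count, starti, j - cur) := by
          simp only [pvF1, reduceIte]
          simp only [hcs']
          rw [if_neg hgt]
        rw [hb, ih (j + 1) (cur + 1) count starti (j - cur) (by omega) (by omega) (by intro _; omega)]


theorem loop3_char (lista : List Int) (M : Int) (hM : 0 < M) (t : List Bool) :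
    ∀ (j cur s1 c1 : Int) acc, 0 ≤ cur → (0 < cur → c1 = j - cur ∧ s1 = c1) →
    (foldIdx (pvF3 lista M) (cur, cur, s1, c1, acc) j t).2.2.2.2
      = acc ++ (if cur < M then gSlices lista M (collectRuns j cur t)
                else gSlices lista M ((collectRuns j cur t).drop 1)) := by
  induction t with
  | nil =>
    intro j cur s1 c1 acc h0 hsc
    simp only [foldIdx, collectRuns]
    by_cases hp : 0 < cur
    · rw [if_pos hp]
      by_cases hcm : cur < M
      · rw [if_pos hcm]
        simp only [gSlices, List.filter_cons, decide_eq_true_eq,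
          if_neg (by omega : ¬ (M ≤ cur)), List.filter_nil, List.map_nil, List.append_nil]
      · rw [if_neg hcm]
        simp [gSlices]
    · rw [if_neg hp]
      rw [if_pos (by omega : cur < M)]
      simp [gSlices]
  | cons b t ih =>
    intro j cur s1 c1 acc h0 hsc
    cases b with
    | false =>
      have hb : pvF3 lista M (cur, cur, s1, c1, acc) false j = (0, 0, 0, 0, acc) := by
        simp only [pvF3, Bool.false_eq_true, if_neg (by simp : ¬ False)]
        rw [if_neg (by omega : ¬ (0 : Int) = M)]
      simp only [foldIdx]
      rw [hb, ih (j + 1) 0 0 0 acc (le_refl 0) (by omega)]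
      rw [if_pos (by omega : (0:Int) < M)]
      simp only [collectRuns, if_neg (by simp : ¬ (false = true))]
      by_cases hp : 0 < cur
      · rw [if_pos hp]
        by_cases hcm : cur < M
        · rw [if_pos hcm]
          simp only [gSlices, List.singleton_append, List.filter_cons, decide_eq_true_eq,
            if_neg (by omega : ¬ (M ≤ cur))]
        · rw [if_neg hcm]
          simp [gSlices]
      · rw [if_neg hp]
        rw [if_pos (by omega : cur < M)]
        simp
    | true =>
      have hcs' : (if cur + 1 = 1 then j else c1) = j - cur := by
        by_cases h0' : cur = 0
        · subst h0'; simp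
        · rw [if_neg (by omega)]; exact (hsc (by omega)).1
      simp only [foldIdx]
      simp only [collectRuns, reduceIte]
      by_cases hm : cur + 1 = M
      · have hb : pvF3 lista M (cur, cur, s1, c1, acc) true j
            = (cur + 1, cur + 1, j - cur, j - cur,
               acc ++ [PySem.List.slice lista (some (j - cur)) (some (j - cur + M + 1))]) := by
          simp only [pvF3, reduceIte, hcs']
          rw [if_pos (by omega : cur + 1 > cur), if_pos hm]
        rw [hb, ih (j + 1) (cur + 1) (j - cur) (j - cur) _ (by omega)
              (by intro _; constructor <;> omega)]
        rw [if_neg (by omega : ¬ (cur + 1 < M))]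
        rw [if_pos (by omega : cur < M)]
        obtain ⟨ℓ, rest, heqX, hℓ⟩ := collect_pos t (j + 1) (cur + 1) (by omega)
        rw [heqX]
        simp only [gSlices, List.drop_succ_cons, List.drop_zero, List.filter_cons,
          decide_eq_true_eq, if_pos (by omega : M ≤ ℓ), List.map_cons]
        simp only [show j + 1 - (cur + 1) = j - cur by ring]
        simp
      · have hb : pvF3 lista M (cur, cur, s1, c1, acc) true j
            = (cur + 1, cur + 1, j - cur, j - cur, acc) := by
          simp only [pvF3, reduceIte, hcs']
          rw [if_pos (by omega : cur + 1 > cur), if_neg hm]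
        rw [hb, ih (j + 1) (cur + 1) (j - cur) (j - cur) _ (by omega)
              (by intro _; constructor <;> omega)]
        by_cases hcm : cur + 1 < M
        · rw [if_pos hcm, if_pos (by omega : cur < M)]
        · rw [if_neg hcm, if_neg (by omega : ¬ (cur < M))]


theorem bloop_char (t : List Bool) : ∀ (j cur e : Int) (runs : List (Int × Int)),
    e = j + (t.length : Int) →
    (foldIdx pvFB (runs, cur) j t).1 ++
      (if 0 < (foldIdx pvFB (runs, cur) j t).2 then
        [(e - (foldIdx pvFB (runs, cur) j t).2, (foldIdx pvFB (runs, cur) j t).2)]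
      else [])
    = runs ++ collectRuns j cur t := by
  induction t with
  | nil =>
    intro j cur e runs he
    simp only [List.length_nil, Int.natCast_zero, add_zero] at he
    subst he
    simp only [foldIdx, collectRuns]
  | cons b t ih =>
    intro j cur e runs he
    cases b with
    | true =>
      have hb : pvFB (runs, cur) true j = (runs, cur + 1) := by simp [pvFB]
      simp only [foldIdx]
      rw [hb, ih (j + 1) (cur + 1) e runs (by simp [List.length_cons] at he; omega)]
      simp [collectRuns]
    | false =>
      have hb : pvFB (runs, cur) false j
          = (runs ++ (if 0 < cur then [(j - cur, cur)] else []), 0) := by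
        simp only [pvFB, Bool.false_eq_true, if_neg (by simp : ¬ False)]
        split_ifs <;> simp
      simp only [foldIdx]
      rw [hb, ih (j + 1) 0 e _ (by simp [List.length_cons] at he; omega)]
      simp only [collectRuns, if_neg (by simp : ¬ (false = true))]
      simp [List.append_assoc]


-- the two ports, reduced to the shared run-analysis of the descent list
theorem main_eq (lista : List Int) :
    get_longest_digit_count_desc lista = get_longest_digit_count_desc_alt lista := by
  have hwhile : ∀ nr : Int, (if 0 < nr then pvAWhile 0 nr else 1) = pvBNdigits nr := by
    intro nr
    by_cases h : 0 < nr
    · rw [if_pos h, pvWhile_eq, pvBNdigits, if_neg (by omega)]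
    · rw [if_neg h, pvBNdigits, if_pos (by omega)]
  have hcounts : (PySem.List.pyRange 0 (lista.length : Int) 1).foldl (pvABody0 lista) []
      = lista.map pvBNdigits := by
    have h1 : pvABody0 lista = fun acc i =>
        (fun (acc : List Int) (nr : Int) => acc ++ [if 0 < nr then pvAWhile 0 nr else 1])
          acc (PySem.List.pyGetD lista i 0) := by
      funext acc i
      simp only [pvABody0]
      by_cases h : 0 < PySem.List.pyGetD lista i 0 <;> simp [h]
    rw [h1, PySem.List.foldl_pyRange_zero_pyGetD' lista 0
      (fun (acc : List Int) (nr : Int) => acc ++ [if 0 < nr then pvAWhile 0 nr else 1]) []]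
    rw [PySem.List.foldl_append_singleton_eq_map]
    simp only [hwhile, List.nil_append]
  have hbody1 : pvABody1 (lista.map pvBNdigits) = fun st i =>
      pvF1 st (decide (PySem.List.pyGetD (lista.map pvBNdigits) i 0
        > PySem.List.pyGetD (lista.map pvBNdigits) (i + 1) 0)) i := by
    funext st i
    simp only [pvABody1, pvF1]
    by_cases h : PySem.List.pyGetD (lista.map pvBNdigits) i 0
        > PySem.List.pyGetD (lista.map pvBNdigits) (i + 1) 0 <;> simp [h]
  have hs2 : (PySem.List.pyRange 0 (((lista.map pvBNdigits).length : Int) - 1) 1).foldl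
        (pvABody1 (lista.map pvBNdigits)) (0, 0, 0, 0)
      = foldIdx pvF1 (0, 0, 0, 0) 0 (descList (lista.map pvBNdigits)) := by
    rw [hbody1]
    simpa using bridgeA (lista.map pvBNdigits) pvF1 0 (0, 0, 0, 0)
  have hpair := loop1_char (descList (lista.map pvBNdigits)) 0 0 0 0 0
    (le_refl 0) (le_refl 0) (by omega)
  have hbodyB : pvBBody (lista.map pvBNdigits) = fun st i =>
      pvFB st (decide (PySem.List.pyGetD (lista.map pvBNdigits) (i - 1) 0
        > PySem.List.pyGetD (lista.map pvBNdigits) i 0)) (i - 1) := by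
    funext st i
    simp only [pvBBody, pvFB]
    by_cases h : PySem.List.pyGetD (lista.map pvBNdigits) (i - 1) 0
        > PySem.List.pyGetD (lista.map pvBNdigits) i 0 <;> simp [h]
  have hrc : (PySem.List.pyRange 1 ((lista.map pvBNdigits).length : Int) 1).foldl
        (pvBBody (lista.map pvBNdigits)) ([], 0)
      = foldIdx pvFB ([], 0) 0 (descList (lista.map pvBNdigits)) := by
    rw [hbodyB]
    simpa using bridgeB (lista.map pvBNdigits) pvFB 1 (le_refl 1) ([], 0)
  have hruns : (if 0 < (foldIdx pvFB ([], 0) 0 (descList (lista.map pvBNdigits))).2 then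
        (foldIdx pvFB ([], 0) 0 (descList (lista.map pvBNdigits))).1
          ++ [(((lista.map pvBNdigits).length : Int) - 1
                - (foldIdx pvFB ([], 0) 0 (descList (lista.map pvBNdigits))).2,
              (foldIdx pvFB ([], 0) 0 (descList (lista.map pvBNdigits))).2)]
      else (foldIdx pvFB ([], 0) 0 (descList (lista.map pvBNdigits))).1)
      = collectRuns 0 0 (descList (lista.map pvBNdigits)) := by
    have hb := bloop_char (descList (lista.map pvBNdigits)) 0 0
      (((descList (lista.map pvBNdigits)).length : Int)) [] (by simp)
    by_cases h2 : 0 < (foldIdx pvFB ([], 0) 0 (descList (lista.map pvBNdigits))).2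
    · rw [if_pos h2]
      rw [if_pos h2] at hb
      have hne : lista.map pvBNdigits ≠ [] := by
        intro hnil
        rw [hnil] at h2
        simp [descList, foldIdx] at h2
      have h1 : 1 ≤ (lista.map pvBNdigits).length := by
        cases hx : lista.map pvBNdigits with
        | nil => exact absurd hx hne
        | cons y ys => simp
      have hlen : ((descList (lista.map pvBNdigits)).length : Int)
          = ((lista.map pvBNdigits).length : Int) - 1 := by
        rw [descList_length]; omega
      rw [hlen] at hb
      simpa using hb
    · rw [if_neg h2]
      rw [if_neg h2] at hb
      simpa using hb
  simp only [get_longest_digit_count_desc, get_longest_digit_count_desc_alt]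
  rw [hcounts, hs2, hrc, hruns]
  have hcount := congrArg Prod.fst hpair
  have hstarti := congrArg Prod.snd hpair
  simp only at hcount hstarti
  rw [hcount, hstarti, (stepFold_fst (collectRuns 0 0 (descList (lista.map pvBNdigits))) (0, 0)).symm]
  rcases stepFold_decomp (collectRuns 0 0 (descList (lista.map pvBNdigits))) (0, 0)
    with ⟨he, _⟩ | ⟨pre, r, post, heq, hval, hlt, hpre, hpost⟩
  · rw [he]
    simp
  · rw [hval]
    rw [if_neg (by simp; omega), if_neg (by simp; omega)]
    have hmem : r ∈ collectRuns 0 0 (descList (lista.map pvBNdigits)) := by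
      rw [heq]; simp
    have hr1 : 0 ≤ r.1 := by
      have := collect_start_ge (descList (lista.map pvBNdigits)) 0 0 (le_refl 0) r hmem
      omega
    have hr2 : 0 < r.2 := by simpa using hlt
    -- A's second scan
    have hbody2 : pvABody2 lista (lista.map pvBNdigits) r.2 = fun st i =>
        pvF3 lista r.2 st (decide (PySem.List.pyGetD (lista.map pvBNdigits) i 0
          > PySem.List.pyGetD (lista.map pvBNdigits) (i + 1) 0)) i := by
      funext st i
      simp only [pvABody2, pvF3]
      by_cases h : PySem.List.pyGetD (lista.map pvBNdigits) i 0
          > PySem.List.pyGetD (lista.map pvBNdigits) (i + 1) 0 <;> simp [h]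
    have hcast : (((r.1 + r.2 + 1).toNat : Int)) = r.1 + r.2 + 1 := by omega
    have hs3 : (PySem.List.pyRange (r.1 + r.2 + 1) (((lista.map pvBNdigits).length : Int) - 1) 1).foldl
          (pvABody2 lista (lista.map pvBNdigits) r.2)
          (0, 0, 0, 0, [PySem.List.slice lista (some r.1) (some (r.1 + r.2 + 1))])
        = foldIdx (pvF3 lista r.2)
            (0, 0, 0, 0, [PySem.List.slice lista (some r.1) (some (r.1 + r.2 + 1))])
            ((r.1 + r.2 + 1 : Int)) ((descList (lista.map pvBNdigits)).drop (r.1 + r.2 + 1).toNat) := by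
      rw [hbody2]
      have hbr := bridgeA (lista.map pvBNdigits) (pvF3 lista r.2) (r.1 + r.2 + 1).toNat
        (0, 0, 0, 0, [PySem.List.slice lista (some r.1) (some (r.1 + r.2 + 1))])
      rw [hcast] at hbr
      exact hbr
    simp only
    rw [hs3]
    have h3 := loop3_char lista r.2 hr2 ((descList (lista.map pvBNdigits)).drop (r.1 + r.2 + 1).toNat)
      (r.1 + r.2 + 1) 0 0 0 [PySem.List.slice lista (some r.1) (some (r.1 + r.2 + 1))]
      (le_refl 0) (by omega)
    rw [if_pos hr2] at h3
    rw [h3]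
    have hpost_eq := collect_decomp_suffix pre r post 0 0 (descList (lista.map pvBNdigits))
      (le_refl 0) heq
    rw [show r.1 + r.2 + 1 - 0 = r.1 + r.2 + 1 by ring] at hpost_eq
    rw [← hpost_eq]
    have hfpre : pre.filter (fun x => decide (x.2 = r.2)) = [] := by
      refine List.filter_eq_nil_iff.mpr ?_
      intro x hx
      have := hpre x hx
      simp only [decide_eq_true_eq]
      omega
    rw [heq, List.filter_append, hfpre, List.nil_append,
      List.filter_cons_of_pos (by simp), List.map_cons]
    simp only [gSlices, List.singleton_append, List.cons.injEq]
    refine ⟨trivial, ?_⟩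
    rw [List.filter_congr (fun x hx => ?_)]
    have := hpost x hx
    simp only [decide_eq_decide]
    constructor <;> omega

-- ===== VERDICT (by name: the statement is the Claim_ definition above) =====
theorem get_longest_digit_count_desc_spec : Claim_equal_get_longest_digit_count_desc := by
  intro lista _
  unfold Spec_get_longest_digit_count_desc
  exact main_eq lista
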